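-- pv_equiv track=rewrite | github.com/Ibrahim-newaeon/Stratum-AI-Final-Updates-Dec-2025 | backend/app/services/embed_widgets/security.py | _is_origin_allowed
-- ===== SOURCE A (Python) =====
-- from typing import Dict, List, Optional, Any
--
-- def _is_origin_allowed(origin: str, allowed_domains: List[str]) -> bool:
--     """Check if origin is in allowed domains list."""
--     if not origin:
--         return False
--
--     # Extract hostname from origin
--     try:
--         if "://" in origin:
--             hostname = origin.split("://")[1]
--         else:
--             hostname = origin
--
--         if ":" in hostname:
--             hostname = hostname.split(":")[0]
--
--         if "/" in hostname:
--             hostname = hostname.split("/")[0]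
--
--         hostname = hostname.lower()
--     except Exception:
--         return False
--
--     # Check against allowed domains
--     for pattern in allowed_domains:
--         pattern = pattern.lower()
--
--         if hostname == pattern:
--             return True
--
--         if pattern.startswith("*."):
--             base = pattern[2:]
--             if hostname == base or hostname.endswith("." + base):
--                 return True
--
--     return False
-- ===== SOURCE B (Python) =====
-- def _is_origin_allowed(origin, allowed_domains):
--     """Check origin's hostname against precomputed exact/wildcard pattern sets."""
--     if not origin:
--         return False
--
--     # Extract hostname from origin (same prologue as the original)
--     hostname = origin
--     if "://" in hostname:
--         hostname = hostname.split("://")[1]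
--     if ":" in hostname:
--         hostname = hostname.split(":")[0]
--     if "/" in hostname:
--         hostname = hostname.split("/")[0]
--     hostname = hostname.lower()
--
--     # Index the patterns once: exact matches and wildcard bases.
--     lowered = [p.lower() for p in allowed_domains]
--     exact = set(lowered)
--     wild = {p[2:] for p in lowered if p.startswith("*.")}
--
--     if hostname in exact or hostname in wild:
--         return True
--
--     # A wildcard base matches iff it is a dot-suffix of the hostname.
--     for i, c in enumerate(hostname):
--         if c == "." and hostname[i + 1:] in wild:
--             return True
--     return False
-- ===== Notes on version B (the rewrite author's own statement) =====
-- stated objective: alternative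
-- what changed: Instead of scanning the pattern list and testing each pattern against the hostname, B builds an exact-match set and a wildcard-base set from the patterns once and then checks the hostname and each of its dot-suffixes for membership in those sets.
import Mathlib
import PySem

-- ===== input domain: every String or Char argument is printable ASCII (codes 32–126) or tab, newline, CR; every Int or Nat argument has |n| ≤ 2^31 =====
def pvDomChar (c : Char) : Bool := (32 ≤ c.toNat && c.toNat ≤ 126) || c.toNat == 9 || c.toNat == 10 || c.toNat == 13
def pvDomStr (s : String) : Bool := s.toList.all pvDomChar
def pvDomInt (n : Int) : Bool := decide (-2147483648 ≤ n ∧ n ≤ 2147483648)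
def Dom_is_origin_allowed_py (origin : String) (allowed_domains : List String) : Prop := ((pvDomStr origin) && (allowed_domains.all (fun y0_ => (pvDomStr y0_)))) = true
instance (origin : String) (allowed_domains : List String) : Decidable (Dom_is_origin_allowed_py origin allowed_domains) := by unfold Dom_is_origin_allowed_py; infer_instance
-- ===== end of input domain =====

-- B indexes the patterns once into an exact-match set and a wildcard-base set and then
-- tests the hostname's dot-suffixes against them, instead of re-testing every pattern
-- against the hostname (objective: alternative decomposition, same cost).

-- Shared hostname-extraction prologue (identical lines in both Python versions):
-- split "://" → [1], split ":" → [0], split "/" → [0], lower.  The .getD defaults are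
-- never used: the surrounding membership tests guarantee the indexed part exists.
def pvHost (origin : List Char) : List Char :=
  let h0 := if PySem.Chars.isIn "://".toList origin
            then (PySem.Chars.splitOn origin "://".toList).getD 1 [] else origin
  let h1 := if PySem.Chars.isIn [':'] h0
            then (PySem.Chars.splitOn h0 [':']).getD 0 [] else h0
  let h2 := if PySem.Chars.isIn ['/'] h1
            then (PySem.Chars.splitOn h1 ['/']).getD 0 [] else h1
  PySem.Chars.lower h2

-- ===== PORT A =====
-- pattern[2:] on a string is List.drop 2 (PySem.List.slice_from_natCast); "." + base is '.' :: base
def is_origin_allowed_py (origin : String) (allowed_domains : List String) : Bool :=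
  if origin = "" then false
  else
    let hostname := pvHost origin.toList
    allowed_domains.any (fun pattern =>
      let p := PySem.Chars.lower pattern.toList
      hostname == p ||
        (PySem.Chars.startswith p "*.".toList &&
          (let base := p.drop 2
           hostname == base || PySem.Chars.endswith hostname ('.' :: base))))

-- ===== PORT B =====
def is_origin_allowed_py_alt (origin : String) (allowed_domains : List String) : Bool :=
  if origin = "" then false
  else
    let hostname := pvHost origin.toList
    let lowered := allowed_domains.map (fun p => PySem.Chars.lower p.toList)
    let exact : PySem.Set (List Char) := PySem.Set.ofList lowered
    let wild : PySem.Set (List Char) :=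
      PySem.Set.ofList ((lowered.filter
        (fun p => PySem.Chars.startswith p "*.".toList)).map (fun p => p.drop 2))
    if PySem.Set.contains exact hostname || PySem.Set.contains wild hostname then true
    else (PySem.List.enumerate hostname).any
      (fun ic => ic.2 == '.' &&
        PySem.Set.contains wild (PySem.List.slice hostname (some (ic.1 + 1)) none))

-- ===== PRECONDITION & SPEC =====
def Spec_is_origin_allowed_py (origin : String) (allowed_domains : List String) (out : Bool) : Prop := out = is_origin_allowed_py_alt origin allowed_domains
instance (origin : String) (allowed_domains : List String) (out : Bool) : Decidable (Spec_is_origin_allowed_py origin allowed_domains out) := by unfold Spec_is_origin_allowed_py; infer_instance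

-- ===== CLAIM (what is proved, stated in full; the proofs are below) =====
def Claim_equal_is_origin_allowed_py : Prop := ∀ (origin : String) (allowed_domains : List String), Dom_is_origin_allowed_py origin allowed_domains → Spec_is_origin_allowed_py origin allowed_domains (is_origin_allowed_py origin allowed_domains)

-- ===== LEMMAS AND PROOFS =====

-- '.'·b is a suffix of h iff b is the tail of h after some dot.
lemma pv_ends_iff (h b : List Char) :
    PySem.Chars.endswith h ('.' :: b) = true ↔
      ∃ k, ∃ _ : k < h.length, h[k] = '.' ∧ h.drop (k + 1) = b := by
  rw [PySem.Chars.endswith_iff]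
  constructor
  · rintro ⟨t, rfl⟩
    exact ⟨t.length, by simp, by simp, by simp⟩
  · rintro ⟨k, hk, hdot, hdrop⟩
    exact ⟨h.take k, by
      conv_rhs => rw [← List.take_append_drop k h]
      rw [List.drop_eq_getElem_cons hk, hdot, hdrop]⟩

lemma pv_slice (h : List Char) (k : Nat) :
    PySem.List.slice h (some ((0 : Int) + k + 1)) none = h.drop (k + 1) := by
  rw [show ((0 : Int) + k + 1) = ((k + 1 : Nat) : Int) by push_cast; ring,
    PySem.List.slice_from_natCast]

lemma pv_enum_iff (h : List Char) (P : Int × Char → Prop) :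
    (∃ x, (∃ k, ∃ _ : k < h.length, x = (0 + (k : Int), h[k])) ∧ P x) ↔
      ∃ k, ∃ _ : k < h.length, P (0 + (k : Int), h[k]) := by
  constructor
  · rintro ⟨x, ⟨k, hk, rfl⟩, hp⟩
    exact ⟨k, hk, hp⟩
  · rintro ⟨k, hk, hp⟩
    exact ⟨_, ⟨k, hk, rfl⟩, hp⟩

-- A's per-pattern scan equals B's set-indexed suffix test, for any hostname h.
lemma pv_main (h : List Char) (allowed_domains : List String) :
    (allowed_domains.any (fun pattern =>
      let p := PySem.Chars.lower pattern.toList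
      h == p ||
        (PySem.Chars.startswith p "*.".toList &&
          (let base := p.drop 2
           h == base || PySem.Chars.endswith h ('.' :: base))))) =
    (let lowered := allowed_domains.map (fun p => PySem.Chars.lower p.toList)
     let exact : PySem.Set (List Char) := PySem.Set.ofList lowered
     let wild : PySem.Set (List Char) :=
       PySem.Set.ofList ((lowered.filter
         (fun p => PySem.Chars.startswith p "*.".toList)).map (fun p => p.drop 2))
     if PySem.Set.contains exact h || PySem.Set.contains wild h then true
     else (PySem.List.enumerate h).any
       (fun ic => ic.2 == '.' &&
         PySem.Set.contains wild (PySem.List.slice h (some (ic.1 + 1)) none))) := by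
  rw [Bool.eq_iff_iff]
  simp only [List.any_eq_true, Bool.or_eq_true, Bool.and_eq_true, beq_iff_eq,
    PySem.Set.contains_iff, PySem.Set.mem_ofList, List.mem_map, List.mem_filter,
    pv_ends_iff]
  simp only [Bool.if_true_left, Bool.or_eq_true, decide_eq_true_iff, List.any_eq_true,
    Bool.and_eq_true, beq_iff_eq, PySem.Set.contains_iff, PySem.Set.mem_ofList,
    List.mem_map, List.mem_filter, PySem.List.mem_enumerate_iff]
  simp only [pv_enum_iff]
  simp only [pv_slice]
  constructor
  · rintro ⟨x, hx, heq | ⟨hsw, heq | ⟨k, hk, hdot, hdr⟩⟩⟩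
    · exact Or.inl (Or.inl ⟨x, hx, heq.symm⟩)
    · exact Or.inl (Or.inr ⟨_, ⟨⟨x, hx, rfl⟩, hsw⟩, heq.symm⟩)
    · exact Or.inr ⟨k, hk, hdot, _, ⟨⟨x, hx, rfl⟩, hsw⟩, hdr.symm⟩
  · rintro ((⟨a, ha, heq⟩ | ⟨a, ⟨⟨x, hx, rfl⟩, hsw⟩, hdr⟩) |
      ⟨k, hk, hdot, a, ⟨⟨x, hx, rfl⟩, hsw⟩, hdr⟩)
    · exact ⟨a, ha, Or.inl heq.symm⟩
    · exact ⟨x, hx, Or.inr ⟨hsw, Or.inl hdr.symm⟩⟩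
    · exact ⟨x, hx, Or.inr ⟨hsw, Or.inr ⟨k, hk, hdot, hdr.symm⟩⟩⟩

-- ===== VERDICT (by name: the statement is the Claim_ definition above) =====
theorem is_origin_allowed_py_spec : Claim_equal_is_origin_allowed_py := by
  intro origin allowed_domains _
  unfold Spec_is_origin_allowed_py is_origin_allowed_py is_origin_allowed_py_alt
  by_cases h0 : origin = ""
  · simp [h0]
  · simp only [h0]
    exact pv_main (pvHost origin.toList) allowed_domains
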